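-- pv_equiv track=rewrite | github.com/zzarru/studywithZaru | 고대유적_문풀.py | count
-- ===== SOURCE A (Python) =====
-- def count(lst):
--     mx = 2
--     for i in lst:
--         cnt = 0
--         for j in i:
--             if j:
--                 cnt += 1
--                 if mx < cnt:
--                     mx = cnt
--             else:
--                 cnt = 0
--
--     return mx
-- ===== SOURCE B (Python) =====
-- def count(lst):
--     lengths = [len(piece)
--                for row in lst
--                for piece in ''.join('1' if j else '0' for j in row).split('0')]
--     return max([2, *lengths])
-- ===== Notes on version B (the rewrite author's own statement) =====
-- stated objective: idiomatic
-- what changed: Replaces A's nested loops with a running counter and maximum by encoding each row as a '1'/'0' string, splitting it on '0' into maximal truthy runs, and taking max of all piece lengths seeded with the floor 2.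
import Mathlib
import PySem

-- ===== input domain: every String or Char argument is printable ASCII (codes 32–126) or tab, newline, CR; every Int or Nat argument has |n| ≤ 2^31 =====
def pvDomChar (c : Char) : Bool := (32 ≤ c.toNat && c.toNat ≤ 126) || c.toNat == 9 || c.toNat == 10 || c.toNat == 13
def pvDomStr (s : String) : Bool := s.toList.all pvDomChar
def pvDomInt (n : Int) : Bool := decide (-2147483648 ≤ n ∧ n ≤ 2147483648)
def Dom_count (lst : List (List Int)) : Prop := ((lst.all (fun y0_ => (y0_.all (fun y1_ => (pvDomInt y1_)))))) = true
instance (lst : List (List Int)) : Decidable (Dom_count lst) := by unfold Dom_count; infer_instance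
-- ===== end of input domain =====

-- B recomputes A's "longest truthy run, floored at 2" by encoding each row as '1'/'0'
-- characters, splitting on '0' and maxing the piece lengths (idiomatic, not faster).

-- ===== PORT A =====
def count (lst : List (List Int)) : Int :=
  (lst.foldl
    (fun mx i =>
      (i.foldl
        (fun (s : Int × Int) j =>
          if j ≠ 0 then
            let cnt := s.2 + 1
            (if s.1 < cnt then cnt else s.1, cnt)
          else
            (s.1, 0))
        (mx, 0)).1)
    2)

-- ===== PORT B =====
-- Source B's ''.join('1' if j else '0' …) is ported as a map to '1'/'0' chars, and the
-- standard-library call str.split('0') as Mathlib's List.splitOn '0' on those chars,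
-- which is exact for a nonempty one-char separator (empty pieces are kept on both sides).
def count_alt (lst : List (List Int)) : Int :=
  let lengths : List Int :=
    lst.flatMap (fun row =>
      (((row.map (fun j => if j ≠ 0 then '1' else '0')).splitOn '0').map
        (fun piece => (piece.length : Int))))
  lengths.foldl max 2

-- ===== PRECONDITION & SPEC =====
def Spec_count (lst : List (List Int)) (out : Int) : Prop := out = count_alt lst
instance (lst : List (List Int)) (out : Int) : Decidable (Spec_count lst out) := by unfold Spec_count; infer_instance

-- ===== CLAIM (what is proved, stated in full; the proofs are below) =====
def Claim_equal_count : Prop := ∀ (lst : List (List Int)), Dom_count lst → Spec_count lst (count lst)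

-- ===== LEMMAS AND PROOFS =====

-- A's inner loop over one row, as a named step function.
def pvStepA (s : Int × Int) (j : Int) : Int × Int :=
  if j ≠ 0 then
    let cnt := s.2 + 1
    (if s.1 < cnt then cnt else s.1, cnt)
  else
    (s.1, 0)

def pvBit (j : Int) : Char := if j ≠ 0 then '1' else '0'

-- Key per-row invariant: A's (mx, cnt) fold equals the max over the run lengths that
-- List.splitOn '0' produces, the first run extended by the pending counter cnt.
theorem pvRow (row : List Int) :
    ∀ (mx cnt : Int), 0 ≤ cnt → cnt ≤ mx →
    (row.foldl pvStepA (mx, cnt)).1 =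
      match (row.map pvBit).splitOn '0' with
      | [] => mx
      | h :: t => (t.map (fun p => (p.length : Int))).foldl max (max mx (cnt + h.length)) := by
  induction row with
  | nil =>
    intro mx cnt h0 hle
    simp [List.splitOn, List.splitOnP_nil]
    omega
  | cons j row ih =>
    intro mx cnt h0 hle
    rcases hsp : (row.map pvBit).splitOn '0' with _ | ⟨h, t⟩
    · exact absurd hsp (List.splitOnP_ne_nil _ _)
    · by_cases hj : j = 0
      · -- falsy element: counter resets, a new empty run is opened
        have : ((j :: row).map pvBit).splitOn '0' = [] :: h :: t := by
          simp [pvBit, hj, List.splitOn, List.splitOnP_cons, List.splitOn] at hsp ⊢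
          exact hsp
        rw [this]
        have lhs : ((j :: row).foldl pvStepA (mx, cnt)).1 = (row.foldl pvStepA (mx, 0)).1 := by
          simp [pvStepA, hj]
        rw [lhs, ih mx 0 le_rfl (by omega), hsp]
        simp
        congr 1
        omega
      · -- truthy element: counter grows, the first run gains one char
        have : ((j :: row).map pvBit).splitOn '0' = ('1' :: h) :: t := by
          simp [pvBit, hj, List.splitOn, List.splitOnP_cons, List.splitOn] at hsp ⊢
          rw [hsp]; rfl
        rw [this]
        have hstate : pvStepA (mx, cnt) j = (max mx (cnt + 1), cnt + 1) := by
          simp [pvStepA, hj, Prod.ext_iff]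
          split_ifs <;> omega
        have lhs : ((j :: row).foldl pvStepA (mx, cnt)).1
            = (row.foldl pvStepA (max mx (cnt + 1), cnt + 1)).1 := by
          rw [List.foldl_cons, hstate]
        rw [lhs, ih (max mx (cnt + 1)) (cnt + 1) (by omega) (le_max_right _ _), hsp]
        simp
        congr 1
        omega

-- Per-row corollary with cnt = 0: A's inner fold is a plain max-fold over all run lengths.
theorem pvRow0 (row : List Int) (mx : Int) (hmx : 0 ≤ mx) :
    (row.foldl pvStepA (mx, 0)).1 =
      (((row.map pvBit).splitOn '0').map (fun p => (p.length : Int))).foldl max mx := by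
  rcases hsp : (row.map pvBit).splitOn '0' with _ | ⟨h, t⟩
  · exact absurd hsp (List.splitOnP_ne_nil _ _)
  · rw [pvRow row mx 0 le_rfl hmx, hsp]
    simp

-- Folding max over a flatMap folds it row by row.
theorem pvFoldFlat (l : List (List Int)) (f : List Int → List Int) :
    ∀ (a : Int), (l.flatMap f).foldl max a = l.foldl (fun a row => (f row).foldl max a) a := by
  induction l with
  | nil => intro a; simp
  | cons r l ih => intro a; simp [List.flatMap_cons, List.foldl_append, ih]

-- The seed of a max-fold only grows.
theorem pvFoldMaxLe (xs : List Int) : ∀ (a : Int), a ≤ xs.foldl max a := by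
  induction xs with
  | nil => intro a; simp
  | cons x xs ih => intro a; exact le_trans (le_max_left a x) (ih (max a x))

theorem pvKey (lst : List (List Int)) : ∀ (a : Int), 0 ≤ a →
    lst.foldl (fun mx i => (i.foldl pvStepA (mx, 0)).1) a
      = lst.foldl (fun a row =>
          (((row.map pvBit).splitOn '0').map (fun p => (p.length : Int))).foldl max a) a := by
  induction lst with
  | nil => intro a _; rfl
  | cons r l ih =>
    intro a ha
    simp only [List.foldl_cons]
    rw [pvRow0 r a ha, ih _ (le_trans ha (pvFoldMaxLe _ a))]

theorem pvMain (lst : List (List Int)) : count lst = count_alt lst := by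
  have e1 : count lst = lst.foldl (fun mx i => (i.foldl pvStepA (mx, 0)).1) 2 := rfl
  have e2 : count_alt lst =
      (lst.flatMap (fun row =>
        (((row.map pvBit).splitOn '0').map (fun p => (p.length : Int))))).foldl max 2 := rfl
  rw [e1, e2, pvFoldFlat]
  exact pvKey lst 2 (by omega)

-- ===== VERDICT (by name: the statement is the Claim_ definition above) =====
theorem count_spec : Claim_equal_count := by
  intro lst _
  unfold Spec_count
  exact pvMain lst
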